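-- pv_equiv track=rewrite | github.com/epoyraz/leetcode | solutions/2254.py | checkValid
-- ===== SOURCE A (Python) =====
-- def checkValid(matrix):
--     n = len(matrix)
--     required = set(range(1, n + 1))
--
--     for i in range(n):
--         if set(matrix[i]) != required:
--             return False
--         if set(matrix[j][i] for j in range(n)) != required:
--             return False
--
--     return True
-- ===== SOURCE B (Python) =====
-- def checkValid(matrix):
--     n = len(matrix)
--     full = (1 << n) - 1
--     cols = [0] * n
--     for row in matrix:
--         seen = 0
--         for j, v in enumerate(row):
--             if v < 1 or v > n:
--                 return False
--             b = 1 << (v - 1)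
--             seen |= b
--             if j < n:
--                 cols[j] |= b
--         if seen != full:
--             return False
--     return all(c == full for c in cols)
-- ===== Notes on version B (the rewrite author's own statement) =====
-- stated objective: alternative
-- what changed: B abandons set objects entirely: each value is range-checked and rejected early, then folded as the bit 1<<(v-1) into a per-row bitmask and a per-column bitmask, and validity is integer equality of each mask with 2^n-1, instead of A's construction and comparison of Python sets per row and per column.
-- outside the precondition, e.g. on checkValid([[1, 2], [2]]): A returns False, B returns False
import Mathlib
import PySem

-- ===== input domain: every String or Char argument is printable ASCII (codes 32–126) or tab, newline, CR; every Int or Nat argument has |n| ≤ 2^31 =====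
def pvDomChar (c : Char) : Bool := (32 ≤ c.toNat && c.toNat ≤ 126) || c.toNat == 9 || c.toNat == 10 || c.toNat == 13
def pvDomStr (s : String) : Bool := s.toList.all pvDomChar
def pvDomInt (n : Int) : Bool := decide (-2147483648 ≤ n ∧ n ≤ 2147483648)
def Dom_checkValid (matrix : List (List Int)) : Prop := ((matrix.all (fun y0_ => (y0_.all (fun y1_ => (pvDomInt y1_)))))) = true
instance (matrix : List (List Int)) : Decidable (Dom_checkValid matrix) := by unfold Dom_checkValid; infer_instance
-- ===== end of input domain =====

-- B replaces A's set objects and set comparisons by integer bitmask arithmetic: each value is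
-- rejected early if outside 1..n, otherwise contributes bit 1<<(v-1) to a row mask and a column
-- mask, and validity is mask = 2^n - 1; equivalence of the return value on Pre_ (where Python A
-- returns normally).

-- ===== PORT A =====
def checkValidLoop (matrix : List (List Int)) (required : PySem.Set Int) (n : Nat) (i : Nat) : Bool :=
  if i < n then
    if PySem.Set.equal (PySem.Set.ofList (PySem.List.pyGetD matrix (i : Int) [])) required = false then
      false
    else if PySem.Set.equal (PySem.Set.ofList ((PySem.List.pyRange 0 (n : Int) 1).map
              (fun j => PySem.List.pyGetD (PySem.List.pyGetD matrix j []) (i : Int) 0))) required = false then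
      false
    else
      checkValidLoop matrix required n (i + 1)
  else true
termination_by n - i

def checkValid (matrix : List (List Int)) : Bool :=
  let n := matrix.length
  let required : PySem.Set Int := PySem.Set.ofList (PySem.List.pyRange 1 ((n : Int) + 1) 1)
  checkValidLoop matrix required n 0

-- ===== PORT B =====
-- b = 1 << (v - 1); exact: B computes it only after the guard 1 ≤ v, where the shift count is (v-1).toNat
def pyBit (v : Int) : Int := (1 : Int) <<< (v - 1).toNat

-- the inner 'for j, v in enumerate(row)' loop; none = the early 'return False' on an out-of-range value
def scanRow (n : Int) : List Int → Nat → Int → List Int → Option (Int × List Int)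
  | [], _, seen, cols => some (seen, cols)
  | v :: rest, j, seen, cols =>
    if v < 1 ∨ n < v then none
    else
      scanRow n rest (j + 1) (PySem.Int.bor seen (pyBit v))
        (if (j : Int) < n then
           PySem.List.pySetD cols (j : Int)
             (PySem.Int.bor (PySem.List.pyGetD cols (j : Int) 0) (pyBit v))
         else cols)

def loopB (n full : Int) : List (List Int) → List Int → Bool
  | [], cols => cols.all (fun c => c == full)
  | row :: rest, cols =>
    match scanRow n row 0 0 cols with
    | none => false
    | some (seen, cols') => if seen != full then false else loopB n full rest cols'

def checkValid_alt (matrix : List (List Int)) : Bool :=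
  let n : Int := matrix.length
  -- full = (1 << n) - 1; exact: n = len(matrix) ≥ 0
  let full : Int := ((1 : Int) <<< matrix.length) - 1
  loopB n full matrix (List.replicate matrix.length 0)

-- ===== PRECONDITION & SPEC =====
-- Pre_ excludes ragged matrices (some row shorter than len(matrix)) whose first row's set already
-- equals {1..n}: on those A can hit IndexError inside the column generator; on the excluded inputs
-- where A still returns, an earlier check fails and B returns the same value False (see cites).
def Pre_checkValid (matrix : List (List Int)) : Prop :=
  (∀ r ∈ matrix, matrix.length ≤ r.length) ∨
  PySem.Set.equal (PySem.Set.ofList (matrix.headD []))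
    (PySem.Set.ofList (PySem.List.pyRange 1 ((matrix.length : Int) + 1) 1)) = false
instance (matrix : List (List Int)) : Decidable (Pre_checkValid matrix) := by
  unfold Pre_checkValid; infer_instance

def pvWitness_checkValid : List (List Int) := [[1, 2], [2, 1]]

def Spec_checkValid (matrix : List (List Int)) (out : Bool) : Prop := out = checkValid_alt matrix
instance (matrix : List (List Int)) (out : Bool) : Decidable (Spec_checkValid matrix out) := by
  unfold Spec_checkValid; infer_instance

-- ===== CLAIM (what is proved, stated in full; the proofs are below) =====
def Claim_equal_checkValid : Prop := ∀ (matrix : List (List Int)), Dom_checkValid matrix → Pre_checkValid matrix → Spec_checkValid matrix (checkValid matrix)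

-- ===== LEMMAS AND PROOFS =====

-- proof-side views of B's loops
def seenOf (seen : Int) (row : List Int) : Int :=
  row.foldl (fun m v => PySem.Int.bor m (pyBit v)) seen

def colsOf (n : Int) : List Int → Nat → List Int → List Int
  | [], _, cols => cols
  | v :: rest, j, cols =>
    colsOf n rest (j + 1)
      (if (j : Int) < n then
         PySem.List.pySetD cols (j : Int)
           (PySem.Int.bor (PySem.List.pyGetD cols (j : Int) 0) (pyBit v))
       else cols)

def nmask (acc : Nat) (row : List Int) : Nat :=
  row.foldl (fun m v => m ||| 2 ^ (v - 1).toNat) acc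

-- characterisation of A's loop
lemma loopA_char (matrix : List (List Int)) (required : PySem.Set Int) (n : Nat) :
    ∀ d i, n - i = d →
      (checkValidLoop matrix required n i = true ↔
        ∀ k, i ≤ k → k < n →
          (PySem.Set.equal (PySem.Set.ofList (PySem.List.pyGetD matrix (k : Int) [])) required = true ∧
           PySem.Set.equal (PySem.Set.ofList ((PySem.List.pyRange 0 (n : Int) 1).map
              (fun j => PySem.List.pyGetD (PySem.List.pyGetD matrix j []) (k : Int) 0))) required = true)) := by
  intro d
  induction d with
  | zero =>
    intro i hd
    have hni : ¬ i < n := by omega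
    rw [checkValidLoop]
    simp [hni]
    intro k hk1 hk2; omega
  | succ d ih =>
    intro i hd
    have hin : i < n := by omega
    have step : checkValidLoop matrix required n i =
        (PySem.Set.equal (PySem.Set.ofList (PySem.List.pyGetD matrix (i : Int) [])) required &&
         (PySem.Set.equal (PySem.Set.ofList ((PySem.List.pyRange 0 (n : Int) 1).map
            (fun j => PySem.List.pyGetD (PySem.List.pyGetD matrix j []) (i : Int) 0))) required &&
          checkValidLoop matrix required n (i + 1))) := by
      rw [checkValidLoop]
      simp only [hin, if_true]
      cases PySem.Set.equal (PySem.Set.ofList (PySem.List.pyGetD matrix (i : Int) [])) required <;>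
        cases PySem.Set.equal (PySem.Set.ofList ((PySem.List.pyRange 0 (n : Int) 1).map
          (fun j => PySem.List.pyGetD (PySem.List.pyGetD matrix j []) (i : Int) 0))) required <;> simp
    rw [step, Bool.and_eq_true, Bool.and_eq_true, ih (i + 1) (by omega)]
    constructor
    · rintro ⟨hrow, hcol, hrest⟩ k hk1 hk2
      rcases Nat.eq_or_lt_of_le hk1 with rfl | hlt
      · exact ⟨hrow, hcol⟩
      · exact hrest k hlt hk2
    · intro h
      exact ⟨(h i (Nat.le_refl i) hin).1, (h i (Nat.le_refl i) hin).2,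
        fun k hk1 hk2 => h k (by omega) hk2⟩

-- A's column list IS the row-major column list
lemma colList_eq (matrix : List (List Int)) (k : Nat) :
    (PySem.List.pyRange 0 (matrix.length : Int) 1).map
        (fun j => PySem.List.pyGetD (PySem.List.pyGetD matrix j []) (k : Int) 0) =
      matrix.map (fun r => PySem.List.pyGetD r (k : Int) 0) := by
  have h := PySem.List.map_pyGetD_pyRange_zero' (xs := matrix) (d := ([] : List Int))
  calc (PySem.List.pyRange 0 (matrix.length : Int) 1).map
        (fun j => PySem.List.pyGetD (PySem.List.pyGetD matrix j []) (k : Int) 0)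
      = ((PySem.List.pyRange 0 (matrix.length : Int) 1).map
          (fun j => PySem.List.pyGetD matrix j [])).map (fun r => PySem.List.pyGetD r (k : Int) 0) := by
        rw [List.map_map]; rfl
    _ = matrix.map (fun r => PySem.List.pyGetD r (k : Int) 0) := by rw [h]

-- all-rows check as an indexed statement
lemma all_rows_iff (matrix : List (List Int)) (required : PySem.Set Int) :
    (matrix.all (fun r => PySem.Set.equal (PySem.Set.ofList r) required) = true) ↔
      (∀ k, k < matrix.length →
        PySem.Set.equal (PySem.Set.ofList (PySem.List.pyGetD matrix (k : Int) [])) required = true) := by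
  rw [List.all_eq_true]
  constructor
  · intro h k hk
    have hget : PySem.List.pyGetD matrix (k : Int) [] = matrix[k] := by
      rw [PySem.List.pyGetD_natCast, List.getD_eq_getElem?_getD, List.getElem?_eq_getElem hk,
        Option.getD_some]
    rw [hget]
    exact h _ (List.getElem_mem hk)
  · intro h r hr
    obtain ⟨k, hk, hkr⟩ := List.getElem_of_mem hr
    have := h k hk
    rw [PySem.List.pyGetD_natCast, List.getD_eq_getElem?_getD, List.getElem?_eq_getElem hk,
      Option.getD_some, hkr] at this
    exact this

-- the inner scan = guard + seen-mask + column update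
lemma scanRow_eq (n : Int) :
    ∀ (row : List Int) (j : Nat) (seen : Int) (cols : List Int),
      scanRow n row j seen cols =
        if row.all (fun v => decide (1 ≤ v) && decide (v ≤ n)) then
          some (seenOf seen row, colsOf n row j cols)
        else none := by
  intro row
  induction row with
  | nil => intro j seen cols; simp [scanRow, seenOf, colsOf]
  | cons v rest ih =>
    intro j seen cols
    rw [scanRow]
    by_cases hv : v < 1 ∨ n < v
    · have : ¬ (decide (1 ≤ v) && decide (v ≤ n) && rest.all (fun v => decide (1 ≤ v) && decide (v ≤ n))) = true := by
        rcases hv with hv | hv <;> simp <;> omega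
      simp only [hv, if_true, List.all_cons]
      rw [if_neg this]
    · have h1 : (1 : Int) ≤ v := by omega
      have h2 : v ≤ n := by omega
      simp only [hv, if_false, List.all_cons, h1, h2, decide_true, Bool.true_and, ih, seenOf,
        colsOf, List.foldl_cons]

-- characterisation of B's loop
lemma loopB_char (n full : Int) :
    ∀ (rows : List (List Int)) (cols : List Int),
      loopB n full rows cols =
        (rows.all (fun r => (r.all (fun v => decide (1 ≤ v) && decide (v ≤ n))) && (seenOf 0 r == full)) &&
          (rows.foldl (fun c r => colsOf n r 0 c) cols).all (fun c => c == full)) := by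
  intro rows
  induction rows with
  | nil => intro cols; simp [loopB]
  | cons row rest ih =>
    intro cols
    rw [loopB, scanRow_eq]
    by_cases hok : row.all (fun v => decide (1 ≤ v) && decide (v ≤ n)) = true
    · rw [if_pos hok]
      by_cases hseen : seenOf 0 row == full
      · simp only [bne_eq_false_iff_eq.mpr (by exact eq_of_beq hseen)]
        simp only [List.all_cons, hok, hseen, Bool.true_and, List.foldl_cons]
        rw [ih]
        simp
      · have hne : (seenOf 0 row != full) = true := by
          simp only [bne_iff_ne, ne_eq]
          intro heq; exact hseen (by simp [heq])
        simp [List.all_cons, hne, hseen]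
    · rw [if_neg hok]
      simp [List.all_cons, Bool.eq_false_iff.mpr hok]

-- bit values as Nat casts
lemma pyBit_cast (v : Int) (h : 1 ≤ v) : pyBit v = ((2 ^ (v - 1).toNat : Nat) : Int) := by
  simp [pyBit, Int.shiftLeft_eq]

lemma seenOf_cast (row : List Int) :
    ∀ (m : Nat), (∀ v ∈ row, 1 ≤ v) → seenOf (m : Int) row = ((nmask m row : Nat) : Int) := by
  induction row with
  | nil => intro m _; simp [seenOf, nmask]
  | cons v rest ih =>
    intro m h
    have h1 : (1 : Int) ≤ v := h v (List.mem_cons_self ..)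
    rw [seenOf, List.foldl_cons, nmask, List.foldl_cons]
    rw [pyBit_cast v h1, PySem.Int.bor_natCast]
    exact ih (m ||| 2 ^ (v - 1).toNat) (fun v hv => h v (List.mem_cons_of_mem _ hv))

lemma nmask_testBit (row : List Int) :
    ∀ (acc : Nat) (b : Nat),
      (nmask acc row).testBit b = (acc.testBit b || row.any (fun v => decide ((v - 1).toNat = b))) := by
  induction row with
  | nil => intro acc b; simp [nmask]
  | cons v rest ih =>
    intro acc b
    rw [nmask, List.foldl_cons]
    have : rest.foldl (fun m v => m ||| 2 ^ (v - 1).toNat) (acc ||| 2 ^ (v - 1).toNat) =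
        nmask (acc ||| 2 ^ (v - 1).toNat) rest := rfl
    rw [this, ih, Nat.testBit_or, Nat.testBit_two_pow, List.any_cons, Bool.or_assoc]

-- mask = 2^N - 1 ⟷ coverage of 1..N (given range)
lemma mask_full_iff (N : Nat) (row : List Int) (h : ∀ v ∈ row, 1 ≤ v ∧ v ≤ (N : Int)) :
    nmask 0 row = 2 ^ N - 1 ↔ (∀ m : Int, 1 ≤ m → m < (N : Int) + 1 → m ∈ row) := by
  constructor
  · intro heq m hm1 hm2
    have hb : (m - 1).toNat < N := by omega
    have := congrArg (fun x => x.testBit (m - 1).toNat) heq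
    simp only [nmask_testBit, Nat.zero_testBit, Bool.false_or,
      Nat.testBit_two_pow_sub_one, hb, decide_true] at this
    rw [List.any_eq_true] at this
    obtain ⟨v, hv, hvb⟩ := this
    have hvr := h v hv
    have : v = m := by
      have := of_decide_eq_true hvb
      omega
    rwa [this] at hv
  · intro hcov
    apply Nat.eq_of_testBit_eq
    intro b
    rw [nmask_testBit, Nat.zero_testBit, Bool.false_or, Nat.testBit_two_pow_sub_one]
    by_cases hb : b < N
    · have hm := hcov ((b : Int) + 1) (by omega) (by omega)
      rw [decide_eq_true hb]
      rw [List.any_eq_true]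
      exact ⟨(b : Int) + 1, hm, by simp only [decide_eq_true_eq]; omega⟩
    · rw [decide_eq_false hb]
      rw [List.any_eq_false]
      intro v hv
      have := h v hv
      simp only [decide_eq_true_eq]
      omega

-- B's row check ⟷ A's set comparison, for any list of ints
lemma row_check_eq_set (N : Nat) (row : List Int) :
    ((row.all (fun v => decide (1 ≤ v) && decide (v ≤ (N : Int)))) &&
       (seenOf 0 row == ((1 : Int) <<< N) - 1)) =
      PySem.Set.equal (PySem.Set.ofList row)
        (PySem.Set.ofList (PySem.List.pyRange 1 ((N : Int) + 1) 1)) := by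
  rw [Bool.eq_iff_iff, Bool.and_eq_true, List.all_eq_true, PySem.Set.equal_iff]
  have hfull : ((1 : Int) <<< N) - 1 = ((2 ^ N - 1 : Nat) : Int) := by
    have : ((1 : Int) <<< N) = ((2 ^ N : Nat) : Int) := by simp [Int.shiftLeft_eq]
    rw [this]
    have : (1 : Nat) ≤ 2 ^ N := Nat.one_le_two_pow
    push_cast [this]
    ring
  constructor
  · rintro ⟨hall, hseen⟩
    have hr : ∀ v ∈ row, (1 : Int) ≤ v ∧ v ≤ (N : Int) := by
      intro v hv
      have := hall v hv
      rw [Bool.and_eq_true, decide_eq_true_eq, decide_eq_true_eq] at this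
      exact this
    have hcast := seenOf_cast row 0 (fun v hv => (hr v hv).1)
    rw [Nat.cast_zero] at hcast
    rw [hcast, hfull] at hseen
    have hmask : nmask 0 row = 2 ^ N - 1 := by exact_mod_cast eq_of_beq hseen
    have hcov := (mask_full_iff N row hr).mp hmask
    intro x
    rw [PySem.Set.mem_ofList, PySem.Set.mem_ofList, PySem.List.mem_pyRange_one]
    constructor
    · intro hx; have := hr x hx; omega
    · intro hx; exact hcov x hx.1 hx.2
  · intro hiff
    have hr : ∀ v ∈ row, (1 : Int) ≤ v ∧ v ≤ (N : Int) := by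
      intro v hv
      have := (hiff v).mp (by rw [PySem.Set.mem_ofList]; exact hv)
      rw [PySem.Set.mem_ofList, PySem.List.mem_pyRange_one] at this
      omega
    refine ⟨fun v hv => by simp [(hr v hv).1, (hr v hv).2], ?_⟩
    have hcov : ∀ m : Int, 1 ≤ m → m < (N : Int) + 1 → m ∈ row := by
      intro m h1 h2
      have := (hiff m).mpr (by rw [PySem.Set.mem_ofList, PySem.List.mem_pyRange_one]; exact ⟨h1, h2⟩)
      rwa [PySem.Set.mem_ofList] at this
    have hcast := seenOf_cast row 0 (fun v hv => (hr v hv).1)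
    rw [Nat.cast_zero] at hcast
    rw [hcast, hfull]
    have := (mask_full_iff N row hr).mpr hcov
    simp [this]

-- colsOf: length preserved, entries updated positionally
lemma colsOf_length (n : Int) :
    ∀ (row : List Int) (j : Nat) (cols : List Int),
      (colsOf n row j cols).length = cols.length := by
  intro row
  induction row with
  | nil => intro j cols; rfl
  | cons v rest ih =>
    intro j cols
    rw [colsOf, ih]
    split
    · rw [PySem.List.pySetD_natCast, List.length_set]
    · rfl

lemma colsOf_getD (N : Nat) :
    ∀ (row : List Int) (j : Nat) (cols : List Int), cols.length = N →
      ∀ k, k < N →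
        (colsOf (N : Int) row j cols).getD k 0 =
          if j ≤ k ∧ k < j + row.length then
            PySem.Int.bor (cols.getD k 0) (pyBit (PySem.List.pyGetD row ((k - j : Nat) : Int) 0))
          else cols.getD k 0 := by
  intro row
  induction row with
  | nil =>
    intro j cols hlen k hk
    rw [colsOf]
    have : ¬ (j ≤ k ∧ k < j + ([] : List Int).length) := by simp
    rw [if_neg this]
  | cons v rest ih =>
    intro j cols hlen k hk
    rw [colsOf]
    by_cases hjn : (j : Int) < (N : Int)
    · rw [if_pos hjn, PySem.List.pySetD_natCast]
      have hjN : j < N := by exact_mod_cast hjn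
      have hlen' : (cols.set j (PySem.Int.bor (PySem.List.pyGetD cols (j : Int) 0) (pyBit v))).length = N := by
        rw [List.length_set]; exact hlen
      rw [ih (j + 1) _ hlen' k hk]
      rcases Nat.lt_trichotomy k j with hkj | hkj | hkj
      · have c1 : ¬ (j + 1 ≤ k ∧ k < j + 1 + rest.length) := by omega
        have c2 : ¬ (j ≤ k ∧ k < j + (v :: rest).length) := by omega
        rw [if_neg c1, if_neg c2]
        rw [List.getD_eq_getElem?_getD, List.getD_eq_getElem?_getD, List.getElem?_set_ne (by omega)]
      · subst hkj
        have c1 : ¬ (k + 1 ≤ k ∧ k < k + 1 + rest.length) := by omega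
        have c2 : (k ≤ k ∧ k < k + (v :: rest).length) := by simp
        rw [if_neg c1, if_pos c2]
        have : (k - k : Nat) = 0 := by omega
        rw [this]
        have hget : PySem.List.pyGetD (v :: rest) ((0 : Nat) : Int) 0 = v := by
          rw [PySem.List.pyGetD_natCast]; rfl
        rw [hget]
        rw [List.getD_eq_getElem?_getD, List.getElem?_set_self (by omega), Option.getD_some]
        congr 1
        rw [PySem.List.pyGetD_natCast, List.getD_eq_getElem?_getD]
      · by_cases c1 : k < j + 1 + rest.length
        · have c1' : j + 1 ≤ k ∧ k < j + 1 + rest.length := ⟨by omega, c1⟩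
          have c2 : j ≤ k ∧ k < j + (v :: rest).length := by simp at c1 ⊢; omega
          rw [if_pos c1', if_pos c2]
          have hget : (cols.set j (PySem.Int.bor (PySem.List.pyGetD cols (j : Int) 0) (pyBit v))).getD k 0 = cols.getD k 0 := by
            rw [List.getD_eq_getElem?_getD, List.getD_eq_getElem?_getD, List.getElem?_set_ne (by omega)]
          rw [hget]
          congr 2
          have h1 : (k - (j + 1) : Nat) < rest.length := by omega
          have h2 : (k - j : Nat) = (k - (j + 1) : Nat) + 1 := by omega
          rw [PySem.List.pyGetD_natCast, PySem.List.pyGetD_natCast, h2, List.getD_cons_succ]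
        · have c1' : ¬ (j + 1 ≤ k ∧ k < j + 1 + rest.length) := by omega
          have c2 : ¬ (j ≤ k ∧ k < j + (v :: rest).length) := by simp at c1 ⊢; omega
          rw [if_neg c1', if_neg c2]
          rw [List.getD_eq_getElem?_getD, List.getD_eq_getElem?_getD, List.getElem?_set_ne (by omega)]
    · have : ¬ (j : Int) < (N : Int) := hjn
      rw [if_neg this]
      have hjN : N ≤ j := by omega
      rw [ih (j + 1) _ hlen k hk]
      have c1 : ¬ (j + 1 ≤ k ∧ k < j + 1 + rest.length) := by omega
      have c2 : ¬ (j ≤ k ∧ k < j + (v :: rest).length) := by omega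
      rw [if_neg c1, if_neg c2]

-- the fold of colsOf over the rows: per-column OR of the column's bits
lemma foldCols_getD (N : Nat) :
    ∀ (rows : List (List Int)) (cols : List Int), cols.length = N →
      (∀ r ∈ rows, N ≤ r.length) →
      (rows.foldl (fun c r => colsOf (N : Int) r 0 c) cols).length = N ∧
      ∀ k, k < N →
        (rows.foldl (fun c r => colsOf (N : Int) r 0 c) cols).getD k 0 =
          seenOf (cols.getD k 0) (rows.map (fun r => PySem.List.pyGetD r (k : Int) 0)) := by
  intro rows
  induction rows with
  | nil => intro cols hlen _; exact ⟨hlen, fun k hk => by simp [seenOf]⟩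
  | cons row rest ih =>
    intro cols hlen hr
    have hrow : N ≤ row.length := hr row (List.mem_cons_self ..)
    have hlen' : (colsOf (N : Int) row 0 cols).length = N := by rw [colsOf_length]; exact hlen
    have hrest : ∀ r ∈ rest, N ≤ r.length := fun r h => hr r (List.mem_cons_of_mem _ h)
    obtain ⟨hL, hE⟩ := ih (colsOf (N : Int) row 0 cols) hlen' hrest
    refine ⟨by rw [List.foldl_cons]; exact hL, ?_⟩
    intro k hk
    rw [List.foldl_cons, hE k hk]
    have hcond : (0 : Nat) ≤ k ∧ k < 0 + row.length := ⟨Nat.zero_le k, by omega⟩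
    have := colsOf_getD N row 0 cols hlen k hk
    rw [if_pos hcond] at this
    have hsub : (k - 0 : Nat) = k := by omega
    rw [hsub] at this
    rw [this, List.map_cons]
    simp only [seenOf, List.foldl_cons]

-- all-entries check by index, for any list
lemma all_iff_getD (L : List Int) (p : Int → Bool) :
    (L.all p = true) ↔ ∀ k, k < L.length → p (L.getD k 0) = true := by
  rw [List.all_eq_true]
  constructor
  · intro h k hk
    rw [List.getD_eq_getElem?_getD, List.getElem?_eq_getElem hk, Option.getD_some]
    exact h _ (List.getElem_mem hk)
  · intro h x hx
    obtain ⟨k, hk, hkx⟩ := List.getElem_of_mem hx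
    have := h k hk
    rw [List.getD_eq_getElem?_getD, List.getElem?_eq_getElem hk, Option.getD_some, hkx] at this
    exact this

-- the two ports agree under Pre_
lemma ports_eq (matrix : List (List Int)) (hpre : Pre_checkValid matrix) :
    checkValid matrix = checkValid_alt matrix := by
  unfold checkValid checkValid_alt
  set N := matrix.length with hN
  set required : PySem.Set Int := PySem.Set.ofList (PySem.List.pyRange 1 ((N : Int) + 1) 1) with hreq
  set full : Int := ((1 : Int) <<< N) - 1 with hfull
  rw [Bool.eq_iff_iff]
  rw [loopA_char matrix required N N 0 (by omega)]
  rw [loopB_char, Bool.and_eq_true]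
  rcases hpre with hsq | hmis
  · -- square-or-wider case
    have hAll : (matrix.all (fun r => (r.all (fun v => decide (1 ≤ v) && decide (v ≤ (N : Int)))) && (seenOf 0 r == full)) = true) ↔
        (∀ k, k < N → PySem.Set.equal (PySem.Set.ofList (PySem.List.pyGetD matrix (k : Int) [])) required = true) := by
      rw [← all_rows_iff]
      constructor <;> intro h <;> rw [List.all_eq_true] at h ⊢ <;> intro r hr <;>
        have := h r hr <;> rw [← row_check_eq_set N r] at * <;> exact this
    constructor
    · rintro hA
      have hrows : ∀ k, k < N → PySem.Set.equal (PySem.Set.ofList (PySem.List.pyGetD matrix (k : Int) [])) required = true :=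
        fun k hk => (hA k (Nat.zero_le k) hk).1
      have hrange : ∀ r ∈ matrix, ∀ v ∈ r, (1 : Int) ≤ v ∧ v ≤ (N : Int) := by
        intro r hr v hv
        rw [List.all_eq_true] at hAll
        have := (hAll.mpr hrows) r hr
        rw [Bool.and_eq_true, List.all_eq_true] at this
        have := this.1 v hv
        simp at this
        exact this
      refine ⟨hAll.mpr hrows, ?_⟩
      obtain ⟨hL, hE⟩ := foldCols_getD N matrix (List.replicate N 0) (by simp) hsq
      rw [all_iff_getD, hL]
      intro k hk
      have hcol := (hA k (Nat.zero_le k) hk).2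
      rw [colList_eq] at hcol
      rw [hE k hk, List.getD_eq_getElem?_getD, List.getElem?_replicate_of_lt hk, Option.getD_some]
      have := row_check_eq_set N (matrix.map (fun r => PySem.List.pyGetD r (k : Int) 0))
      rw [Bool.eq_iff_iff, Bool.and_eq_true] at this
      have hc := (this.mpr hcol).2
      simpa using hc
    · rintro ⟨hrowsB, hcolsB⟩
      have hrows := hAll.mp hrowsB
      have hrange : ∀ r ∈ matrix, ∀ v ∈ r, (1 : Int) ≤ v ∧ v ≤ (N : Int) := by
        intro r hr v hv
        rw [List.all_eq_true] at hrowsB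
        have := hrowsB r hr
        rw [Bool.and_eq_true, List.all_eq_true] at this
        have := this.1 v hv
        simp at this
        exact this
      intro k _ hk
      refine ⟨hrows k hk, ?_⟩
      rw [colList_eq]
      obtain ⟨hL, hE⟩ := foldCols_getD N matrix (List.replicate N 0) (by simp) hsq
      rw [all_iff_getD, hL] at hcolsB
      have := hcolsB k hk
      rw [hE k hk, List.getD_eq_getElem?_getD, List.getElem?_replicate_of_lt hk, Option.getD_some] at this
      rw [← row_check_eq_set N, Bool.and_eq_true]
      refine ⟨?_, this⟩
      rw [List.all_eq_true]
      intro v hv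
      rw [List.mem_map] at hv
      obtain ⟨r, hr, rfl⟩ := hv
      have hrl : N ≤ r.length := hsq r hr
      have hmem : PySem.List.pyGetD r (k : Int) 0 ∈ r := by
        rw [PySem.List.pyGetD_natCast, List.getD_eq_getElem?_getD,
          List.getElem?_eq_getElem (by omega), Option.getD_some]
        exact List.getElem_mem (by omega)
      have := hrange r hr _ hmem
      rw [Bool.and_eq_true, decide_eq_true_eq, decide_eq_true_eq]
      exact this
  · -- first-row mismatch case: both sides are false
    have hne : matrix ≠ [] := by
      intro h
      rw [h] at hmis
      simp at hmis
      exact absurd hmis (by decide)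
    obtain ⟨r0, rest, rfl⟩ : ∃ r0 rest, matrix = r0 :: rest := by
      cases matrix with
      | nil => exact absurd rfl hne
      | cons a b => exact ⟨a, b, rfl⟩
    have hhead : PySem.List.pyGetD (r0 :: rest) ((0 : Nat) : Int) [] = r0 := by
      rw [PySem.List.pyGetD_natCast]; rfl
    have hmis' : PySem.Set.equal (PySem.Set.ofList r0) required = false := by
      simpa using hmis
    have hNpos : 0 < N := by simp [hN]
    constructor
    · intro hA
      have := (hA 0 (Nat.zero_le 0) hNpos).1
      rw [hhead] at this
      rw [hmis'] at this
      exact absurd this (by simp)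
    · rintro ⟨hrowsB, _⟩
      rw [List.all_eq_true] at hrowsB
      have := hrowsB r0 (List.mem_cons_self ..)
      rw [row_check_eq_set N r0] at this
      rw [← hreq, hmis'] at this
      exact absurd this (by simp)

-- ===== VERDICT (by name: the statement is the Claim_ definition above) =====
theorem checkValid_spec : Claim_equal_checkValid := by
  intro matrix _ hpre
  unfold Spec_checkValid
  exact ports_eq matrix hpre
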